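-- pv_equiv track=rewrite | github.com/dcaguiar/PaP | lab03/lista_python_funcional.py | q30
-- ===== SOURCE A (Python) =====
-- from typing import List, Tuple, Any
--
-- def q30(lst: List[Any]) -> List[List[Any]]:
--     "Questão 30: pack - empacota duplicadas consecutivas em sublistas"
--     if not lst:
--         return []
--     def _pack_run(l):
--         if not l:
--             return ([], [])
--         h = l[0]
--         # contar sequência inicial
--         def _take_run(xs):
--             if not xs or xs[0] != h:
--                 return []
--             return [xs[0]] + _take_run(xs[1:])
--         run = _take_run(l)
--         rest = l[len(run):]
--         return (run, rest)
--     run, rest = _pack_run(lst)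
--     return [run] + q30(rest)
-- ===== SOURCE B (Python) =====
-- def q30(lst):
--     "Questão 30: pack - empacota duplicadas consecutivas em sublistas"
--     if not lst:
--         return []
--     result = []
--     run = [lst[0]]
--     for e in lst[1:]:
--         if e == run[-1]:
--             run.append(e)
--         else:
--             result.append(run)
--             run = [e]
--     result.append(run)
--     return result
-- ===== Notes on version B (the rewrite author's own statement) =====
-- stated objective: faster
-- what changed: Replaces A's triple-nested recursion (recursive outer pack plus recursive inner run-taker with repeated list slicing) with a single flat loop maintaining a result accumulator and the current run.
import Mathlib
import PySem

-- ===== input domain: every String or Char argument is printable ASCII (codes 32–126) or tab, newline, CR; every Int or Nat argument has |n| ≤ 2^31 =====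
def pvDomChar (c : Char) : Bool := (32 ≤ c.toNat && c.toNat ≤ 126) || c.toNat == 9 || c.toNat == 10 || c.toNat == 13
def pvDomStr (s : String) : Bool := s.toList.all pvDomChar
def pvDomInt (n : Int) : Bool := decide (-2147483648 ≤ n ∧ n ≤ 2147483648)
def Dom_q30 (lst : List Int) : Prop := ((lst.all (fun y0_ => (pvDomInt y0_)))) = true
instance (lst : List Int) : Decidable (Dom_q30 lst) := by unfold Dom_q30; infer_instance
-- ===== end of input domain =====

-- B replaces A's nested recursion with one flat loop over the list maintaining a result accumulator and the current run (removes A's repeated slicing; a timing run measured B faster).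


-- ===== PORT A =====
def takeRunA (h : Int) : List Int → List Int
  | [] => []
  | x :: xs => if x ≠ h then [] else x :: takeRunA h xs

def q30 (lst : List Int) : List (List Int) :=
  match lst with
  | [] => []
  | x :: xs =>
    let run := takeRunA x (x :: xs)
    let rest := (x :: xs).drop run.length
    run :: q30 rest
termination_by lst.length
decreasing_by
  simp only [takeRunA, if_neg (by simp : ¬ x ≠ x), List.length_drop, List.length_cons]
  omega

-- ===== PORT B =====
-- B: one flat pass; `run` is always nonempty, so `run[-1]` is ported as getLastD.
def q30_alt (lst : List Int) : List (List Int) :=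
  match lst with
  | [] => []
  | x :: xs =>
    let st := xs.foldl (fun (st : List (List Int) × List Int) e =>
      if e = st.2.getLastD 0 then (st.1, st.2 ++ [e])
      else (st.1 ++ [st.2], [e])) ([], [x])
    st.1 ++ [st.2]

-- ===== PRECONDITION & SPEC =====
def Spec_q30 (lst : List Int) (out : List (List Int)) : Prop := out = q30_alt lst
instance (lst : List Int) (out : List (List Int)) : Decidable (Spec_q30 lst out) := by unfold Spec_q30; infer_instance

-- ===== CLAIM (what is proved, stated in full; the proofs are below) =====
def Claim_equal_q30 : Prop := ∀ (lst : List Int), Dom_q30 lst → Spec_q30 lst (q30 lst)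

-- ===== LEMMAS AND PROOFS =====


theorem takeRunA_const (v : Int) (cur ys : List Int) (h : ∀ y ∈ cur, y = v) :
    takeRunA v (cur ++ ys) = cur ++ takeRunA v ys := by
  induction cur with
  | nil => simp
  | cons c cs ih =>
    have hc : c = v := h c (by simp)
    simp only [List.cons_append, takeRunA, if_neg (by simp [hc] : ¬ c ≠ v)]
    rw [ih (fun y hy => h y (by simp [hy]))]

theorem getLastD_const (v : Int) : ∀ (cur : List Int) (d : Int), cur ≠ [] → (∀ y ∈ cur, y = v) →
    cur.getLastD d = v
  | [], _, hne, _ => absurd rfl hne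
  | [c], _, _, h => by simpa using h c (by simp)
  | c :: d :: ds, _, _, h => by
    have := getLastD_const v (d :: ds) c (by simp) (fun y hy => h y (by simp [hy]))
    simpa [List.getLastD_cons] using this

theorem q30_const_append (v : Int) (cur ys : List Int) (hne : cur ≠ []) (h : ∀ y ∈ cur, y = v)
    (hys : takeRunA v ys = []) : q30 (cur ++ ys) = cur :: q30 ys := by
  obtain ⟨c, cs, rfl⟩ := List.exists_cons_of_ne_nil hne
  have hc : c = v := h c (by simp)
  rw [List.cons_append, q30]
  have hrun : takeRunA c (c :: (cs ++ ys)) = (c :: cs) ++ takeRunA v ys := by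
    have := takeRunA_const v ((c :: cs)) ys h
    simpa [hc] using this
  simp only [hrun, hys, List.append_nil]
  congr 1
  simp [List.drop_left (l₁ := c :: cs) (l₂ := ys)]

theorem pack_loop (xs : List Int) : ∀ (res : List (List Int)) (cur : List Int) (v : Int),
    cur ≠ [] → (∀ y ∈ cur, y = v) →
    (let st := xs.foldl (fun (st : List (List Int) × List Int) e =>
      if e = st.2.getLastD 0 then (st.1, st.2 ++ [e])
      else (st.1 ++ [st.2], [e])) (res, cur)
     st.1 ++ [st.2]) = res ++ q30 (cur ++ xs) := by
  induction xs with
  | nil =>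
    intro res cur v hne h
    have : q30 (cur ++ []) = cur :: q30 [] := q30_const_append v cur [] hne h (by simp [takeRunA])
    simp only [List.foldl_nil, List.append_nil] at this ⊢
    simp [this, q30]
  | cons e xs ih =>
    intro res cur v hne h
    simp only [List.foldl_cons]
    rw [getLastD_const v cur 0 hne h]
    by_cases hev : e = v
    · rw [if_pos hev]
      have := ih res (cur ++ [e]) v (by simp) (by
        intro y hy
        rcases List.mem_append.1 hy with hy | hy
        · exact h y hy
        · simp at hy; omega)
      rw [this]
      congr 2
      simp
    · rw [if_neg hev]
      have := ih (res ++ [cur]) [e] e (by simp) (by simp)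
      rw [this]
      have hq : q30 (cur ++ (e :: xs)) = cur :: q30 (e :: xs) :=
        q30_const_append v cur (e :: xs) hne h (by simp [takeRunA, hev])
      simp [hq]

-- ===== VERDICT (by name: the statement is the Claim_ definition above) =====
theorem q30_spec : Claim_equal_q30 := by
  intro lst _
  unfold Spec_q30
  cases lst with
  | nil => simp [q30, q30_alt]
  | cons x xs =>
    have := pack_loop xs [] [x] x (by simp) (by simp)
    simp only [List.nil_append, List.singleton_append] at this
    simp only [q30_alt]
    rw [this]
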